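-- pv_equiv track=rewrite | github.com/itzmeanjan/gClient | visualiser/main.py | splitted_delay_spectrum
-- ===== SOURCE A (Python) =====
-- from typing import Dict, List, Pattern, Tuple
-- from math import ceil
--
-- def splitted_delay_spectrum(delays: List[int], slot: int) -> List[Tuple[int, int]]:
--     min_delay = min(delays)
--     max_delay = max(delays)
--     if max_delay - min_delay < 2*slot:
--         return [(min_delay, max_delay)]
--
--     skip_by = ceil((max_delay - min_delay) / slot)
--
--     slots = []
--     while len(slots) < slot:
--         next_delay = min_delay + skip_by
--         if next_delay > max_delay:
--             slots.append((min_delay, max_delay))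
--             break
--
--         slots.append((min_delay, next_delay))
--         min_delay += (skip_by + 1)
--
--     return slots
-- ===== SOURCE B (Python) =====
-- from math import ceil
-- from typing import List, Tuple
--
--
-- def splitted_delay_spectrum(delays: List[int], slot: int) -> List[Tuple[int, int]]:
--     min_delay = min(delays)
--     max_delay = max(delays)
--     if max_delay - min_delay < 2 * slot:
--         return [(min_delay, max_delay)]
--     skip_by = ceil((max_delay - min_delay) / slot)
--     # staged construction: first the slot ENDS (full-slot ends below max, then max itself),
--     # then each start is derived from the previous end, then pair them up
--     ends = list(range(min_delay + skip_by, max_delay, skip_by + 1)) + [max_delay]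
--     starts = [min_delay] + [e + 1 for e in ends[:-1]]
--     return list(zip(starts, ends))
-- ===== Notes on version B (the rewrite author's own statement) =====
-- stated objective: simpler
-- what changed: Replaces A's while-loop with its running min_delay accumulator, length cap and overshoot break by a staged construction: build the list of slot ends (the full-slot ends below max via range, then max), derive each start from the previous end, and zip starts with ends.
-- intended difference: When the delay range splits into full slots before slot slots are produced (skip_by+1 divides max-min+1 and (max-min+1)/(skip_by+1) < slot), A appends a phantom empty slot (max+1, max) whose start exceeds its end and covers no delay; B omits it, which is the intended slot list. — e.g. on splitted_delay_spectrum([0, 7], 3): A returns [(0, 3), (4, 7), (8, 7)], B returns [(0, 3), (4, 7)]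
-- outside the precondition, e.g. on splitted_delay_spectrum([0, 1], -1): A returns [], B raises ValueError; on splitted_delay_spectrum([0, 1], -2): A returns [], B returns [(0, 0), (1, 1)]
import Mathlib
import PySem

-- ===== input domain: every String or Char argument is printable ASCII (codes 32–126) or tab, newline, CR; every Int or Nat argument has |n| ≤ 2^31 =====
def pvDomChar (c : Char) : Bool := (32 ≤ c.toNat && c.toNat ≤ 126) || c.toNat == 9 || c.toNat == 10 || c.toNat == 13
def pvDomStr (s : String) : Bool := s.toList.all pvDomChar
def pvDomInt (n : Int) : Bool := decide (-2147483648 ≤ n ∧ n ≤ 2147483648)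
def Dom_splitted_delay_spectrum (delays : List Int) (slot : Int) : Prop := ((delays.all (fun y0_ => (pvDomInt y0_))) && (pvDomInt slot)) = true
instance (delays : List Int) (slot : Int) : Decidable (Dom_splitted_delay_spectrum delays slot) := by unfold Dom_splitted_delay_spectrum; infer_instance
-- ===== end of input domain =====

-- B replaces A's while-loop/accumulator by a staged construction: the list of slot ENDS first,
-- starts derived from the ends, then a zip (objective: simpler); A additionally appends a phantom
-- slot (max+1, max) on the inputs described by D_ below, where B omits it.

-- ceil(a / b) for integers, b ≠ 0: Python's ceil((max-min)/slot) computed in float is exactly this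
-- integer ceiling for all inputs in Dom (|ints| ≤ 2^31, so the float quotient's ceil is exact).
def pvCeilDiv (a b : Int) : Int := -(PySem.Int.floordiv (-a) b)

-- ===== PORT A =====
-- the while-loop: fuel = slot - len(slots) (each iteration appends exactly one pair)
def pvLoopA (mx skip : Int) : Nat → Int → List (Int × Int)
  | 0, _ => []
  | Nat.succ fuel, mn =>
      if mx < mn + skip then [(mn, mx)]
      else (mn, mn + skip) :: pvLoopA mx skip fuel (mn + (skip + 1))

def splitted_delay_spectrum (delays : List Int) (slot : Int) : List (Int × Int) :=
  match PySem.List.min? delays (fun y => y), PySem.List.max? delays (fun y => y) with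
  | some mn, some mx =>
      if mx - mn < 2 * slot then [(mn, mx)]
      else pvLoopA mx (pvCeilDiv (mx - mn) slot) slot.toNat mn
  | _, _ => []   -- min()/max() raise ValueError on []; excluded by Pre_

-- ===== PORT B =====
-- B-side integer ceiling division (same exactness note as pvCeilDiv above)
def pvCeilDivAlt (a b : Int) : Int := -(PySem.Int.floordiv (-a) b)

def splitted_delay_spectrum_alt (delays : List Int) (slot : Int) : List (Int × Int) :=
  match PySem.List.min? delays (fun y => y) with
  | none => []   -- min() raises ValueError on []; excluded by Pre_
  | some mn =>
    match PySem.List.max? delays (fun y => y) with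
    | none => []
    | some mx =>
      if mx - mn < 2 * slot then [(mn, mx)]
      else
        let skip := pvCeilDivAlt (mx - mn) slot
        let ends := PySem.List.pyRange (mn + skip) mx (skip + 1) ++ [mx]
        let starts := mn :: (ends.dropLast.map (fun e => e + 1))   -- ends[:-1], each +1
        starts.zip ends

-- ===== PRECONDITION & SPEC =====
-- Pre_ excludes empty delays (min() raises ValueError), slot = 0 (ZeroDivisionError) and negative
-- slot, where A's empty-list return is leftover loop state and B's range step skip_by+1 can be 0
-- (ValueError) or yield unrequested slots: slot is the requested number of slots, so the natural
-- domain is slot ≥ 1.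
def Pre_splitted_delay_spectrum (delays : List Int) (slot : Int) : Prop :=
  delays ≠ [] ∧ 1 ≤ slot
instance (delays : List Int) (slot : Int) : Decidable (Pre_splitted_delay_spectrum delays slot) := by
  unfold Pre_splitted_delay_spectrum; infer_instance

def pvWitness_splitted_delay_spectrum : List Int × Int := ([0, 9], 2)

-- max(delays) - min(delays), used only to state D_ (not by either port)
def pvSpan (xs : List Int) : Int := xs.foldl max (xs.headD 0) - xs.foldl min (xs.headD 0)

-- When the delay range splits into full slots before `slot` slots are produced (skip_by+1 divides
-- max-min+1 and (max-min+1)/(skip_by+1) < slot), A appends a phantom empty slot (max+1, max) whose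
-- start exceeds its end and covers no delay; B omits it, which is the intended slot list.
def D_splitted_delay_spectrum (delays : List Int) (slot : Int) : Prop :=
  let d := pvSpan delays
  let k := (d + slot - 1) / slot + 1   -- (skip_by = ⌈(max-min)/slot⌉) + 1, as a plain floor division
  delays ≠ [] ∧ 2 * slot ≤ d ∧ k ∣ (d + 1) ∧ d + 1 < slot * k
instance (delays : List Int) (slot : Int) : Decidable (D_splitted_delay_spectrum delays slot) := by
  unfold D_splitted_delay_spectrum; infer_instance

def Spec_splitted_delay_spectrum (delays : List Int) (slot : Int) (out : List (Int × Int)) : Prop :=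
  ¬ D_splitted_delay_spectrum delays slot → out = splitted_delay_spectrum_alt delays slot
instance (delays : List Int) (slot : Int) (out : List (Int × Int)) : Decidable (Spec_splitted_delay_spectrum delays slot out) := by
  unfold Spec_splitted_delay_spectrum; infer_instance

def pvDiffWitness_splitted_delay_spectrum : List Int × Int := ([0, 7], 3)
def pvDiffWitnessOut_splitted_delay_spectrum : (List (Int × Int)) × (List (Int × Int)) :=
  ([(0, 3), (4, 7), (8, 7)], [(0, 3), (4, 7)])

-- ===== CLAIM (what is proved, stated in full; the proofs are below) =====
def Claim_unchanged_splitted_delay_spectrum : Prop := ∀ (delays : List Int) (slot : Int), Dom_splitted_delay_spectrum delays slot → Pre_splitted_delay_spectrum delays slot → Spec_splitted_delay_spectrum delays slot (splitted_delay_spectrum delays slot)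
def Claim_changed_splitted_delay_spectrum : Prop := Dom_splitted_delay_spectrum (pvDiffWitness_splitted_delay_spectrum.1) (pvDiffWitness_splitted_delay_spectrum.2) ∧ Pre_splitted_delay_spectrum (pvDiffWitness_splitted_delay_spectrum.1) (pvDiffWitness_splitted_delay_spectrum.2) ∧ D_splitted_delay_spectrum (pvDiffWitness_splitted_delay_spectrum.1) (pvDiffWitness_splitted_delay_spectrum.2) ∧ splitted_delay_spectrum (pvDiffWitness_splitted_delay_spectrum.1) (pvDiffWitness_splitted_delay_spectrum.2) = pvDiffWitnessOut_splitted_delay_spectrum.1 ∧ splitted_delay_spectrum_alt (pvDiffWitness_splitted_delay_spectrum.1) (pvDiffWitness_splitted_delay_spectrum.2) = pvDiffWitnessOut_splitted_delay_spectrum.2 ∧ pvDiffWitnessOut_splitted_delay_spectrum.1 ≠ pvDiffWitnessOut_splitted_delay_spectrum.2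
def Claim_exact_splitted_delay_spectrum : Prop := ∀ (delays : List Int) (slot : Int), Dom_splitted_delay_spectrum delays slot → Pre_splitted_delay_spectrum delays slot → D_splitted_delay_spectrum delays slot → splitted_delay_spectrum delays slot ≠ splitted_delay_spectrum_alt delays slot

-- ===== LEMMAS AND PROOFS =====

theorem pvPyRange_pos_nil (a b s : Int) (hs : 0 < s) (hab : b ≤ a) :
    PySem.List.pyRange a b s = [] := by
  rw [PySem.List.pyRange_of_pos _ _ hs]
  simp [if_neg (not_lt.mpr hab)]

theorem pvPyRange_pos_cons (a b s : Int) (hs : 0 < s) (hab : a < b) :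
    PySem.List.pyRange a b s = a :: PySem.List.pyRange (a + s) b s := by
  rw [PySem.List.pyRange_of_pos _ _ hs, PySem.List.pyRange_of_pos _ _ hs]
  rw [if_pos hab]
  by_cases h2 : a + s < b
  · rw [if_pos h2]
    have hcount : ((b - a + s - 1) / s).toNat = ((b - (a + s) + s - 1) / s).toNat + 1 := by
      have : b - a + s - 1 = (b - (a + s) + s - 1) + 1 * s := by ring
      rw [this, Int.add_mul_ediv_right _ _ (by omega : s ≠ 0)]
      have h1 : 0 ≤ (b - (a + s) + s - 1) / s :=
        Int.ediv_nonneg (by omega) (by omega)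
      omega
    rw [hcount, List.range_succ_eq_map]
    simp only [List.map_cons, List.map_map]
    refine List.cons_eq_cons.mpr ⟨by simp, ?_⟩
    apply List.map_congr_left
    intro k _
    simp only [Function.comp_apply]
    push_cast
    ring
  · rw [if_neg h2]
    have hcount : ((b - a + s - 1) / s).toNat = 1 := by
      have he : (b - a + s - 1) / s = 1 := by
        have hsplit : b - a + s - 1 = b - a - 1 + 1 * s := by ring
        rw [hsplit, Int.add_mul_ediv_right _ _ (by omega : s ≠ 0),
            Int.ediv_eq_zero_of_lt (by omega) (by omega)]
        omega
      omega
    rw [hcount]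
    simp

-- B's staged ends/starts/zip construction, closed over mn: one slot per progression point
def pvAltChunk (mx k mn : Int) : List (Int × Int) :=
  let ends := PySem.List.pyRange (mn + k) mx (k + 1) ++ [mx]
  (mn :: (ends.dropLast.map (fun e => e + 1))).zip ends

-- the staged construction equals the map over the start progression
theorem pvAltChunk_eq (mx k : Int) (hk : 1 ≤ k) : ∀ (n : Nat) (mn : Int), mn ≤ mx →
    (mx - mn).toNat = n →
    pvAltChunk mx k mn = (PySem.List.pyRange mn (mx + 1) (k + 1)).map (fun s => (s, min (s + k) mx)) := by
  intro n
  induction n using Nat.strong_induction_on with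
  | _ n ih =>
    intro mn hmn hsz
    unfold pvAltChunk
    dsimp only
    by_cases hfull : mn + k < mx
    · have harr : mn + k + (k + 1) = mn + (k + 1) + k := by ring
      rw [pvPyRange_pos_cons (mn + k) mx (k + 1) (by omega) hfull, harr,
          pvPyRange_pos_cons mn (mx + 1) (k + 1) (by omega) (by omega),
          List.cons_append,
          List.dropLast_cons_of_ne_nil (by simp :
            PySem.List.pyRange (mn + (k + 1) + k) mx (k + 1) ++ [mx] ≠ []),
          List.map_cons, List.zip_cons_cons, List.map_cons]
      have hrec := ih ((mx - (mn + (k + 1))).toNat) (by omega) (mn + (k + 1)) (by omega) rfl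
      unfold pvAltChunk at hrec
      dsimp only at hrec
      rw [min_eq_left (by omega)]
      refine List.cons_eq_cons.mpr ⟨rfl, ?_⟩
      have h1 : mn + k + 1 = mn + (k + 1) := by ring
      rw [h1, hrec]
    · rw [pvPyRange_pos_nil (mn + k) mx (k + 1) (by omega) (by omega)]
      rw [pvPyRange_pos_cons mn (mx + 1) (k + 1) (by omega) (by omega)]
      rw [pvPyRange_pos_nil (mn + (k + 1)) (mx + 1) (k + 1) (by omega) (by omega)]
      simp [min_eq_right (by omega : mx ≤ mn + k)]

-- A's loop agrees with B's start progression whenever the phantom slot is not hit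
theorem pvLoopA_eq (mx k : Int) (hk : 1 ≤ k) : ∀ (fuel : Nat) (mn : Int), mn ≤ mx + 1 →
    mx - mn < (fuel : Int) * (k + 1) →
    ¬((k + 1) ∣ (mx - mn + 1) ∧ mx - mn + 1 < (fuel : Int) * (k + 1)) →
    pvLoopA mx k fuel mn = (PySem.List.pyRange mn (mx + 1) (k + 1)).map (fun s => (s, min (s + k) mx))
  | 0, mn, hmn, hcap, _ => by
      have hmn' : mn = mx + 1 := by push_cast at hcap; omega
      rw [pvPyRange_pos_nil _ _ _ (by omega) (by omega)]
      simp [pvLoopA]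
  | Nat.succ fuel, mn, hmn, hcap, hnoph => by
      by_cases hend : mn = mx + 1
      · exfalso
        apply hnoph
        subst hend
        constructor
        · simp
        · push_cast
          have : (0:Int) < ((fuel:Int) + 1) * (k + 1) := by positivity
          omega
      · have hmnle : mn ≤ mx := by omega
        rw [pvPyRange_pos_cons _ _ _ (by omega) (by omega)]
        simp only [pvLoopA, List.map_cons]
        by_cases hbr : mx < mn + k
        · rw [if_pos hbr]
          rw [show mn + (k + 1) = (mn + k) + 1 by ring,
              pvPyRange_pos_nil _ _ _ (by omega) (by omega)]
          simp [min_eq_right (by omega : mx ≤ mn + k)]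
        · rw [if_neg hbr]
          rw [not_lt] at hbr
          rw [min_eq_left hbr]
          have hrec := pvLoopA_eq mx k hk fuel (mn + (k + 1))
            (by omega)
            (by
              push_cast at hcap ⊢
              have : ((fuel:Int) + 1) * (k + 1) = (fuel:Int) * (k + 1) + (k + 1) := by ring
              omega)
            (by
              rintro ⟨hdvd, hlt⟩
              apply hnoph
              refine ⟨?_, ?_⟩
              · have : mx - mn + 1 = (mx - (mn + (k + 1)) + 1) + (k + 1) := by ring
                rw [this]
                exact dvd_add hdvd dvd_rfl
              · push_cast
                have : ((fuel:Int) + 1) * (k + 1) = (fuel:Int) * (k + 1) + (k + 1) := by ring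
                omega)
          rw [hrec]

-- inside D_, A's loop is B's progression plus the phantom pair (mx+1, mx)
theorem pvLoopA_phantom (mx k : Int) (hk : 1 ≤ k) : ∀ (fuel : Nat) (mn : Int), mn ≤ mx + 1 →
    (k + 1) ∣ (mx - mn + 1) → mx - mn + 1 < (fuel : Int) * (k + 1) →
    pvLoopA mx k fuel mn = (PySem.List.pyRange mn (mx + 1) (k + 1)).map (fun s => (s, min (s + k) mx)) ++ [(mx + 1, mx)]
  | 0, mn, hmn, _, hlt => by
      exfalso
      push_cast at hlt
      omega
  | Nat.succ fuel, mn, hmn, hdvd, hlt => by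
      by_cases hend : mn = mx + 1
      · subst hend
        rw [pvPyRange_pos_nil _ _ _ (by omega) (by omega)]
        simp [pvLoopA, if_pos (by omega : mx < mx + 1 + k)]
      · have hmnle : mn ≤ mx := by omega
        have hfull : k + 1 ≤ mx - mn + 1 := by
          rcases hdvd with ⟨c, hc⟩
          have hc1 : 1 ≤ c := by nlinarith
          nlinarith
        rw [pvPyRange_pos_cons _ _ _ (by omega) (by omega)]
        simp only [pvLoopA, List.map_cons]
        rw [if_neg (by omega)]
        rw [min_eq_left (by omega)]
        have hrec := pvLoopA_phantom mx k hk fuel (mn + (k + 1))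
          (by omega)
          (by
            have h9 : mx - (mn + (k + 1)) + 1 = (mx - mn + 1) - (k + 1) := by ring
            rw [h9]
            exact dvd_sub hdvd dvd_rfl)
          (by
            push_cast at hlt ⊢
            have : ((fuel:Int) + 1) * (k + 1) = (fuel:Int) * (k + 1) + (k + 1) := by ring
            omega)
        rw [hrec, List.cons_append]

theorem pvCeilDiv_eq_ediv (d s : Int) (hs : 0 < s) : pvCeilDiv d s = (d + s - 1) / s := by
  have h1 : (d + s - 1) / s * s ≤ d + s - 1 := Int.ediv_mul_le _ (by omega)
  have h2 : d + s - 1 < ((d + s - 1) / s + 1) * s := Int.lt_ediv_add_one_mul_self _ hs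
  exact (PySem.Int.neg_floordiv_neg_eq_iff_of_pos hs).mpr ⟨by nlinarith, by nlinarith⟩

theorem pvCeilDiv_bracket (d s : Int) (hs : 0 < s) :
    (pvCeilDiv d s - 1) * s < d ∧ d ≤ pvCeilDiv d s * s := by
  have := (PySem.Int.neg_floordiv_neg_eq_iff_of_pos (a := d) (b := s) (q := pvCeilDiv d s) hs).mp rfl
  exact this

-- min?/max? of a nonempty list, and min ≤ max
theorem pvMinMax_spec (x : Int) (t : List Int) :
    PySem.List.min? (x :: t) (fun y => y) = some (t.foldl min x) ∧
    PySem.List.max? (x :: t) (fun y => y) = some (t.foldl max x) ∧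
    t.foldl min x ≤ t.foldl max x := by
  have hmin := PySem.List.min?_id_cons x t
  have hmax := PySem.List.max?_id_cons x t
  refine ⟨hmin, hmax, ?_⟩
  have h1 : t.foldl min x ≤ x := PySem.List.min?_isMin hmin x (by simp)
  have h2 : x ≤ t.foldl max x := PySem.List.max?_isMax hmax x (by simp)
  omega

theorem splitted_core (delays : List Int) (slot : Int) (hne : delays ≠ []) (hs : 1 ≤ slot) :
    (¬ D_splitted_delay_spectrum delays slot →
      splitted_delay_spectrum delays slot = splitted_delay_spectrum_alt delays slot) ∧
    (D_splitted_delay_spectrum delays slot →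
      ∃ p, splitted_delay_spectrum delays slot = splitted_delay_spectrum_alt delays slot ++ [p]) := by
  obtain ⟨x, t, rfl⟩ : ∃ x t, delays = x :: t := by
    cases delays with
    | nil => exact absurd rfl hne
    | cons x t => exact ⟨x, t, rfl⟩
  obtain ⟨hmin, hmax, hle⟩ := pvMinMax_spec x t
  set mn := t.foldl min x with hmn
  set mx := t.foldl max x with hmx
  have hspan : pvSpan (x :: t) = mx - mn := by
    simp [pvSpan, List.foldl_cons, max_self, min_self, ← hmn, ← hmx]
  set d := mx - mn with hd
  set k := pvCeilDiv d slot with hkdef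
  have hA : splitted_delay_spectrum (x :: t) slot =
      if mx - mn < 2 * slot then [(mn, mx)] else pvLoopA mx k slot.toNat mn := by
    unfold splitted_delay_spectrum
    rw [hmin, hmax]
  have hB : splitted_delay_spectrum_alt (x :: t) slot =
      if mx - mn < 2 * slot then [(mn, mx)] else pvAltChunk mx k mn := by
    unfold splitted_delay_spectrum_alt
    rw [hmin, hmax]
    rfl
  have hDval : D_splitted_delay_spectrum (x :: t) slot ↔
      (2 * slot ≤ d ∧ (k + 1) ∣ (d + 1) ∧ d + 1 < slot * (k + 1)) := by
    simp only [D_splitted_delay_spectrum]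
    rw [hspan, ← pvCeilDiv_eq_ediv d slot (by omega), ← hkdef]
    simp only [ne_eq, reduceCtorEq, not_false_eq_true, true_and]
  by_cases hsmall : mx - mn < 2 * slot
  · rw [hA, hB, if_pos hsmall, if_pos hsmall]
    constructor
    · intro _; rfl
    · intro hD
      exfalso
      rw [hDval] at hD
      omega
  · have hd2 : 2 * slot ≤ d := by omega
    obtain ⟨hbr1, hbr2⟩ := pvCeilDiv_bracket d slot (by omega)
    rw [← hkdef] at hbr1 hbr2
    have hk2 : 2 ≤ k := by nlinarith
    have hcap : d < slot * (k + 1) := by nlinarith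
    have htn : ((slot.toNat : Int)) = slot := Int.toNat_of_nonneg (by omega)
    have hchunk : pvAltChunk mx k mn =
        (PySem.List.pyRange mn (mx + 1) (k + 1)).map (fun s => (s, min (s + k) mx)) :=
      pvAltChunk_eq mx k (by omega) (mx - mn).toNat mn (by omega) rfl
    rw [hA, hB, if_neg hsmall, if_neg hsmall, hchunk]
    constructor
    · intro hnD
      rw [hDval] at hnD
      apply pvLoopA_eq mx k (by omega) slot.toNat mn (by omega)
      · rw [htn]; omega
      · rw [htn]
        rintro ⟨h1, h2⟩
        exact hnD ⟨hd2, h1, h2⟩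
    · intro hD
      rw [hDval] at hD
      refine ⟨(mx + 1, mx), ?_⟩
      apply pvLoopA_phantom mx k (by omega) slot.toNat mn (by omega)
      · exact hD.2.1
      · rw [htn]; omega

-- ===== VERDICT (by name: the statement is the Claim_ definition above) =====
theorem splitted_delay_spectrum_spec : Claim_unchanged_splitted_delay_spectrum := by
  intro delays slot _ hpre hnD
  exact ((splitted_core delays slot hpre.1 hpre.2).1 hnD).symm ▸ rfl

theorem splitted_delay_spectrum_changed : Claim_changed_splitted_delay_spectrum := by
  unfold Claim_changed_splitted_delay_spectrum; decide

theorem splitted_delay_spectrum_tight : Claim_exact_splitted_delay_spectrum := by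
  intro delays slot _ hpre hD heq
  obtain ⟨p, h⟩ := (splitted_core delays slot hpre.1 hpre.2).2 hD
  rw [heq] at h
  have := congrArg List.length h
  simp at this
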